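-- pv_equiv track=rewrite | github.com/98coco/cs30_fall2022 | comp sci discussions/ps6.py | rightTriangles2
-- ===== SOURCE A (Python) =====
-- def rightTriangles2(l):
--     if l == []:
--         return []
--     else:
--         head = l[0] #[2,3,4]
--         tail = l[1:] #[[3, 4, 5], [5, 12, 13], [8, 10, 12]]
--         if head[0]**2 + head[1]**2 == head[2]**2:
--             return [head] + rightTriangles2(tail)
--         else:
--             return rightTriangles2(tail)
-- ===== SOURCE B (Python) =====
-- def _is_right(t):
--     return t[0] ** 2 + t[1] ** 2 == t[2] ** 2
--
--
-- def rightTriangles2(l):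
--     return list(filter(_is_right, l))
-- ===== Notes on version B (the rewrite author's own statement) =====
-- stated objective: idiomatic
-- what changed: Replaces the head/tail recursion with repeated list concatenation by a named predicate passed to the built-in filter.
import Mathlib
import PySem

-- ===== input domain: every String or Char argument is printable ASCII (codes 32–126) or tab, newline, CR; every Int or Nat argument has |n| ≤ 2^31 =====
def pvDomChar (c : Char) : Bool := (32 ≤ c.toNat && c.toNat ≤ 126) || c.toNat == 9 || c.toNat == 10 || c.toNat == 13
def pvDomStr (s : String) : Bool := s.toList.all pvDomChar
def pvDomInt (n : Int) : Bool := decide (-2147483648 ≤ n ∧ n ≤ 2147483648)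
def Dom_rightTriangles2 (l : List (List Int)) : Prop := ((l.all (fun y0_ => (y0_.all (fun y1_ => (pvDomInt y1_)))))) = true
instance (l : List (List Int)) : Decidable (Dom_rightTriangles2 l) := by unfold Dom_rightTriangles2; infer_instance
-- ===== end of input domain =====

-- B replaces A's head/tail recursion (which prepends matches via [head] + recursive call)
-- with the built-in filter applied to a named right-triangle predicate; same return value.

-- ===== PORT A =====
-- indexing head[i] is ported with pyGetD (default 0); inside Pre_ every element has ≥ 3 entries, so the default is never used
def rightTriangles2 (l : List (List Int)) : List (List Int) :=
  match l with
  | [] => []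
  | head :: tail =>
    if (PySem.List.pyGetD head 0 0) ^ 2 + (PySem.List.pyGetD head 1 0) ^ 2 == (PySem.List.pyGetD head 2 0) ^ 2 then
      [head] ++ rightTriangles2 tail
    else
      rightTriangles2 tail

-- ===== PORT B =====
def isRightTriple (t : List Int) : Bool :=
  (PySem.List.pyGetD t 0 0) ^ 2 + (PySem.List.pyGetD t 1 0) ^ 2 == (PySem.List.pyGetD t 2 0) ^ 2

def rightTriangles2_alt (l : List (List Int)) : List (List Int) :=
  l.filter isRightTriple

-- ===== PRECONDITION & SPEC =====
-- A raises IndexError (head[2]) on any element shorter than 3; those inputs are excluded.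
def Pre_rightTriangles2 (l : List (List Int)) : Prop := ∀ t ∈ l, 3 ≤ t.length
instance (l : List (List Int)) : Decidable (Pre_rightTriangles2 l) := by unfold Pre_rightTriangles2; infer_instance
def pvWitness_rightTriangles2 : List (List Int) := [[3, 4, 5], [2, 3, 4], [5, 12, 13]]

def Spec_rightTriangles2 (l : List (List Int)) (out : List (List Int)) : Prop := out = rightTriangles2_alt l
instance (l : List (List Int)) (out : List (List Int)) : Decidable (Spec_rightTriangles2 l out) := by unfold Spec_rightTriangles2; infer_instance

-- ===== CLAIM (what is proved, stated in full; the proofs are below) =====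
def Claim_equal_rightTriangles2 : Prop := ∀ (l : List (List Int)), Dom_rightTriangles2 l → Pre_rightTriangles2 l → Spec_rightTriangles2 l (rightTriangles2 l)

-- ===== LEMMAS AND PROOFS =====
theorem rightTriangles2_eq_filter (l : List (List Int)) :
    rightTriangles2 l = l.filter isRightTriple := by
  induction l with
  | nil => rfl
  | cons h t ih =>
    simp only [rightTriangles2, List.filter_cons, isRightTriple]
    split <;> simp [ih]

-- ===== VERDICT (by name: the statement is the Claim_ definition above) =====
theorem rightTriangles2_spec : Claim_equal_rightTriangles2 := by
  intro l _ _
  unfold Spec_rightTriangles2 rightTriangles2_alt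
  exact rightTriangles2_eq_filter l
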